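-- pv_equiv track=rewrite | github.com/pypi-data/pypi-mirror-383 | packages/joplin-mcp/joplin_mcp-0.4.1.tar.gz/joplin_mcp-0.4.1/src/joplin_mcp/fastmcp_server.py | _find_matching_lines
-- ===== SOURCE A (Python) =====
-- from typing import Annotated, Any, Callable, Dict, List, Optional, TypeVar, Union
--
-- def _find_matching_lines(
--     content_lines: List[str], search_terms: List[str], content_start_index: int
-- ) -> tuple[List[tuple[int, str]], List[tuple[int, str]]]:
--     """Find lines matching search terms, separated by AND vs OR logic."""
--     search_terms_lower = [term.lower() for term in search_terms]
--
--     and_matches = []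
--     or_matches = []
--     and_indices = set()
--
--     for i, line in enumerate(content_lines):
--         line_index = i + content_start_index
--         line_lower = line.lower()
--
--         # Check for AND matches (all terms present)
--         if all(term in line_lower for term in search_terms_lower):
--             and_matches.append((line_index, line))
--             and_indices.add(line_index)
--         # Check for OR matches (any terms present), excluding AND matches
--         elif any(term in line_lower for term in search_terms_lower):
--             or_matches.append((line_index, line))
--
--     return and_matches, or_matches
-- ===== SOURCE B (Python) =====
-- def _find_matching_lines(content_lines, search_terms, content_start_index):
--     lows = [t.lower() for t in search_terms]
--     lowered = [line.lower() for line in content_lines]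
--     n = len(content_lines)
--     and_set = set(range(n))
--     or_set = set()
--     for t in lows:
--         hits = {i for i, ll in enumerate(lowered) if t in ll}
--         and_set &= hits
--         or_set |= hits
--     and_matches = []
--     or_matches = []
--     for i, line in enumerate(content_lines):
--         if i in and_set:
--             and_matches.append((i + content_start_index, line))
--         elif i in or_set:
--             or_matches.append((i + content_start_index, line))
--     return and_matches, or_matches
-- ===== Notes on version B (the rewrite author's own statement) =====
-- stated objective: alternative
-- what changed: Replaces A's per-line all()/any() short-circuit checks with a term-major set-algebra pass: for each term build the set of line indices containing it, intersect into an and-set (initialized to all indices) and union into an or-set, then emit matches in one ordered pass over the lines.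
import Mathlib
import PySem

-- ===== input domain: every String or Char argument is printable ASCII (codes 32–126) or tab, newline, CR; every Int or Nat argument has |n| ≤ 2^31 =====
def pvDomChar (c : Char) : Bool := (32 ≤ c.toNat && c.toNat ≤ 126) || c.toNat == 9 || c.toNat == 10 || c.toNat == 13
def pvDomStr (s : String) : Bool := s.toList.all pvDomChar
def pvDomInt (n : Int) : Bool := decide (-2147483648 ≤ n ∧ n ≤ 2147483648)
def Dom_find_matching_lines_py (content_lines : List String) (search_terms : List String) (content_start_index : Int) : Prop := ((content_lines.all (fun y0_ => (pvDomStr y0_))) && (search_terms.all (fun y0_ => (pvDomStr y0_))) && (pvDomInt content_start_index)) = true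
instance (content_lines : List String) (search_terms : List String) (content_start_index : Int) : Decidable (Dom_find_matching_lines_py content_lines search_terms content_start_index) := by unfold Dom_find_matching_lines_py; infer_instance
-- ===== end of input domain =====

-- B replaces A's per-line all/any checks by a term-major set-algebra pass (intersection/union
-- of per-term hit-index sets, then one ordered emission pass); objective: alternative decomposition.

-- ===== PORT A =====
def find_matching_lines_py (content_lines : List String) (search_terms : List String) (content_start_index : Int) : (List (Int × String)) × (List (Int × String)) :=
  let search_terms_lower := search_terms.map (fun term => PySem.Str.lower term)
  let st := (PySem.List.enumerate content_lines 0).foldl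
    (fun (st : (List (Int × String)) × (List (Int × String)) × PySem.Set Int) p =>
      let line_index := p.1 + content_start_index
      let line_lower := PySem.Str.lower p.2
      if search_terms_lower.all (fun term => PySem.Str.isIn term line_lower) then
        (st.1 ++ [(line_index, p.2)], st.2.1, PySem.Set.add st.2.2 line_index)
      else if search_terms_lower.any (fun term => PySem.Str.isIn term line_lower) then
        (st.1, st.2.1 ++ [(line_index, p.2)], st.2.2)
      else st)
    ([], [], PySem.Set.empty)
  (st.1, st.2.1)

-- ===== PORT B =====
-- the set {i for i, ll in enumerate(lowered) if t in ll}
def altHits (lowered : List String) (t : String) : PySem.Set Int :=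
  PySem.Set.ofList (((PySem.List.enumerate lowered 0).filter (fun p => PySem.Str.isIn t p.2)).map Prod.fst)

def find_matching_lines_py_alt (content_lines : List String) (search_terms : List String) (content_start_index : Int) : (List (Int × String)) × (List (Int × String)) :=
  let lows := search_terms.map (fun t => PySem.Str.lower t)
  let lowered := content_lines.map (fun line => PySem.Str.lower line)
  let n := content_lines.length
  let sets := lows.foldl
    (fun (s : PySem.Set Int × PySem.Set Int) t =>
      let hits := altHits lowered t
      (PySem.Set.inter s.1 hits, PySem.Set.union s.2 hits))
    (PySem.Set.ofList (PySem.List.pyRange 0 (n : Int) 1), PySem.Set.empty)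
  (PySem.List.enumerate content_lines 0).foldl
    (fun (acc : (List (Int × String)) × (List (Int × String))) p =>
      if PySem.Set.contains sets.1 p.1 then (acc.1 ++ [(p.1 + content_start_index, p.2)], acc.2)
      else if PySem.Set.contains sets.2 p.1 then (acc.1, acc.2 ++ [(p.1 + content_start_index, p.2)])
      else acc)
    ([], [])

-- ===== PRECONDITION & SPEC =====
def Spec_find_matching_lines_py (content_lines : List String) (search_terms : List String) (content_start_index : Int) (out : (List (Int × String)) × (List (Int × String))) : Prop := out = find_matching_lines_py_alt content_lines search_terms content_start_index
instance (content_lines : List String) (search_terms : List String) (content_start_index : Int) (out : (List (Int × String)) × (List (Int × String))) : Decidable (Spec_find_matching_lines_py content_lines search_terms content_start_index out) := by unfold Spec_find_matching_lines_py; infer_instance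

-- ===== CLAIM (what is proved, stated in full; the proofs are below) =====
def Claim_equal_find_matching_lines_py : Prop := ∀ (content_lines : List String) (search_terms : List String) (content_start_index : Int), Dom_find_matching_lines_py content_lines search_terms content_start_index → Spec_find_matching_lines_py content_lines search_terms content_start_index (find_matching_lines_py content_lines search_terms content_start_index)

-- ===== LEMMAS AND PROOFS =====

lemma mem_enum {α : Type} (xs : List α) (s : Int) (p : Int × α) :
    p ∈ PySem.List.enumerate xs s ↔ ∃ k : Nat, xs[k]? = some p.2 ∧ p.1 = s + k := by
  induction xs generalizing s with
  | nil => simp [PySem.List.enumerate_nil]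
  | cons y ys ih =>
    rw [PySem.List.enumerate_cons]
    simp only [List.mem_cons, ih]
    constructor
    · rintro (h | ⟨k, hk, hp⟩)
      · subst h; exact ⟨0, by simp, by simp⟩
      · exact ⟨k + 1, by simpa using hk, by push_cast; omega⟩
    · rintro ⟨k, hk, hp⟩
      cases k with
      | zero =>
        left
        simp only [List.getElem?_cons_zero, Option.some_inj] at hk
        cases p with
        | mk a b =>
          simp only [Prod.mk.injEq]
          exact ⟨by simp at hp; omega, hk.symm⟩
      | succ k =>
        right
        exact ⟨k, by simpa using hk, by push_cast at hp ⊢; omega⟩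

lemma mem_altHits (lowered : List String) (t : String) (k : Nat) (hk : k < lowered.length) :
    ((k : Int) ∈ altHits lowered t) ↔ PySem.Str.isIn t lowered[k] = true := by
  simp only [altHits, PySem.Set.mem_ofList, List.mem_map, List.mem_filter]
  constructor
  · rintro ⟨p, ⟨hp, hq⟩, hfst⟩
    rcases (mem_enum lowered 0 p).1 hp with ⟨k', hk', hpk⟩
    have : k' = k := by omega
    subst this
    rw [List.getElem?_eq_getElem hk, Option.some_inj] at hk'
    rw [hk']; exact hq
  · intro h
    refine ⟨((k : Int), lowered[k]), ⟨?_, h⟩, rfl⟩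
    exact (mem_enum lowered 0 _).2 ⟨k, List.getElem?_eq_getElem hk, by simp⟩

lemma foldSets_mem (lows lowered : List String) (A O : PySem.Set Int) (i : Int) :
    (i ∈ (lows.foldl
      (fun (s : PySem.Set Int × PySem.Set Int) t =>
        let hits := altHits lowered t
        (PySem.Set.inter s.1 hits, PySem.Set.union s.2 hits)) (A, O)).1
      ↔ i ∈ A ∧ ∀ t ∈ lows, i ∈ altHits lowered t) ∧
    (i ∈ (lows.foldl
      (fun (s : PySem.Set Int × PySem.Set Int) t =>
        let hits := altHits lowered t
        (PySem.Set.inter s.1 hits, PySem.Set.union s.2 hits)) (A, O)).2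
      ↔ i ∈ O ∨ ∃ t ∈ lows, i ∈ altHits lowered t) := by
  induction lows generalizing A O with
  | nil => simp
  | cons t ts ih =>
    simp only [List.foldl_cons]
    constructor
    · rw [(ih _ _).1, PySem.Set.mem_inter]
      simp only [List.mem_cons]
      constructor
      · rintro ⟨⟨hA, ht⟩, hall⟩
        exact ⟨hA, by rintro u (rfl | hu); exact ht; exact hall u hu⟩
      · rintro ⟨hA, hall⟩
        exact ⟨⟨hA, hall t (Or.inl rfl)⟩, fun u hu => hall u (Or.inr hu)⟩
    · rw [(ih _ _).2, PySem.Set.mem_union]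
      simp only [List.mem_cons]
      constructor
      · rintro (⟨hO | ht⟩ | ⟨u, hu, hiu⟩)
        · exact Or.inl hO
        · exact Or.inr ⟨t, Or.inl rfl, ht⟩
        · exact Or.inr ⟨u, Or.inr hu, hiu⟩
      · rintro (hO | ⟨u, rfl | hu, hiu⟩)
        · exact Or.inl (Or.inl hO)
        · exact Or.inl (Or.inr hiu)
        · exact Or.inr ⟨u, hu, hiu⟩

lemma fold_emit_eq (l : List (Int × String)) (lows : List String)
    (andS orS : PySem.Set Int) (csi : Int)
    (h : ∀ p ∈ l,
      (PySem.Set.contains andS p.1 = lows.all (fun t => PySem.Str.isIn t (PySem.Str.lower p.2))) ∧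
      (PySem.Set.contains orS p.1 = lows.any (fun t => PySem.Str.isIn t (PySem.Str.lower p.2))))
    (am om : List (Int × String)) (ai : PySem.Set Int) :
    (l.foldl
      (fun (st : (List (Int × String)) × (List (Int × String)) × PySem.Set Int) p =>
        let line_index := p.1 + csi
        let line_lower := PySem.Str.lower p.2
        if lows.all (fun term => PySem.Str.isIn term line_lower) then
          (st.1 ++ [(line_index, p.2)], st.2.1, PySem.Set.add st.2.2 line_index)
        else if lows.any (fun term => PySem.Str.isIn term line_lower) then
          (st.1, st.2.1 ++ [(line_index, p.2)], st.2.2)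
        else st)
      (am, om, ai)).1 =
    (l.foldl
      (fun (acc : (List (Int × String)) × (List (Int × String))) p =>
        if PySem.Set.contains andS p.1 then (acc.1 ++ [(p.1 + csi, p.2)], acc.2)
        else if PySem.Set.contains orS p.1 then (acc.1, acc.2 ++ [(p.1 + csi, p.2)])
        else acc)
      (am, om)).1 ∧
    (l.foldl
      (fun (st : (List (Int × String)) × (List (Int × String)) × PySem.Set Int) p =>
        let line_index := p.1 + csi
        let line_lower := PySem.Str.lower p.2
        if lows.all (fun term => PySem.Str.isIn term line_lower) then
          (st.1 ++ [(line_index, p.2)], st.2.1, PySem.Set.add st.2.2 line_index)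
        else if lows.any (fun term => PySem.Str.isIn term line_lower) then
          (st.1, st.2.1 ++ [(line_index, p.2)], st.2.2)
        else st)
      (am, om, ai)).2.1 =
    (l.foldl
      (fun (acc : (List (Int × String)) × (List (Int × String))) p =>
        if PySem.Set.contains andS p.1 then (acc.1 ++ [(p.1 + csi, p.2)], acc.2)
        else if PySem.Set.contains orS p.1 then (acc.1, acc.2 ++ [(p.1 + csi, p.2)])
        else acc)
      (am, om)).2 := by
  induction l generalizing am om ai with
  | nil => exact ⟨rfl, rfl⟩
  | cons p ps ih =>
    have hp := h p (List.mem_cons_self ..)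
    have hps : ∀ q ∈ ps, _ := fun q hq => h q (List.mem_cons_of_mem _ hq)
    simp only [List.foldl_cons, hp.1, hp.2]
    split_ifs with h1 h2 <;> exact ih hps _ _ _

theorem find_matching_lines_py_eq (content_lines search_terms : List String) (csi : Int) :
    find_matching_lines_py content_lines search_terms csi =
      find_matching_lines_py_alt content_lines search_terms csi := by
  unfold find_matching_lines_py find_matching_lines_py_alt
  simp only []
  set lows := search_terms.map (fun t => PySem.Str.lower t) with hlows
  set lowered := content_lines.map (fun line => PySem.Str.lower line) with hlowered
  set n := content_lines.length with hn
  set sets := lows.foldl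
      (fun (s : PySem.Set Int × PySem.Set Int) t =>
        let hits := altHits lowered t
        (PySem.Set.inter s.1 hits, PySem.Set.union s.2 hits))
      (PySem.Set.ofList (PySem.List.pyRange 0 (n : Int) 1), PySem.Set.empty) with hsets
  have hcond : ∀ p ∈ PySem.List.enumerate content_lines 0,
      (PySem.Set.contains sets.1 p.1 = lows.all (fun t => PySem.Str.isIn t (PySem.Str.lower p.2))) ∧
      (PySem.Set.contains sets.2 p.1 = lows.any (fun t => PySem.Str.isIn t (PySem.Str.lower p.2))) := by
    intro p hp
    rcases (mem_enum content_lines 0 p).1 hp with ⟨k, hk, hpk⟩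
    have hklt : k < content_lines.length := by
      by_contra hge
      rw [List.getElem?_eq_none (by omega)] at hk
      simp at hk
    have hkl : k < lowered.length := by simpa [hlowered] using hklt
    have hline : content_lines[k] = p.2 := by
      rw [List.getElem?_eq_getElem hklt, Option.some_inj] at hk; exact hk
    have hlow : lowered[k] = PySem.Str.lower p.2 := by
      simp [hlowered, hline]
    have hp1 : p.1 = (k : Int) := by omega
    have hmem := foldSets_mem lows lowered
      (PySem.Set.ofList (PySem.List.pyRange 0 (n : Int) 1)) PySem.Set.empty (k : Int)
    constructor
    · rw [hp1, Bool.eq_iff_iff, PySem.Set.contains_iff, hsets, (hmem).1, List.all_eq_true]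
      constructor
      · rintro ⟨_, hall⟩ t ht
        have := (mem_altHits lowered t k hkl).1 (hall t ht)
        rwa [hlow] at this
      · intro hall
        refine ⟨?_, fun t ht => (mem_altHits lowered t k hkl).2 (by rw [hlow]; exact hall t ht)⟩
        rw [PySem.Set.mem_ofList, PySem.List.mem_pyRange_one]
        constructor <;> omega
    · rw [hp1, Bool.eq_iff_iff, PySem.Set.contains_iff, hsets, (hmem).2, List.any_eq_true]
      constructor
      · rintro (hemp | ⟨t, ht, hit⟩)
        · simp [PySem.Set.empty] at hemp
        · exact ⟨t, ht, by rw [← hlow]; exact (mem_altHits lowered t k hkl).1 hit⟩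
      · rintro ⟨t, ht, hit⟩
        exact Or.inr ⟨t, ht, (mem_altHits lowered t k hkl).2 (by rw [hlow]; exact hit)⟩
  have := fold_emit_eq (PySem.List.enumerate content_lines 0) lows sets.1 sets.2 csi hcond
    [] [] PySem.Set.empty
  exact Prod.ext this.1 this.2

-- ===== VERDICT (by name: the statement is the Claim_ definition above) =====
theorem find_matching_lines_py_spec : Claim_equal_find_matching_lines_py := by
  intro content_lines search_terms csi _
  unfold Spec_find_matching_lines_py
  exact find_matching_lines_py_eq content_lines search_terms csi
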